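-- pv_equiv track=rewrite | github.com/Kozeke/eazy-italian | backend/app/api/v1/endpoints/course_generationOld.py | _insert_missing_closers
-- ===== SOURCE A (Python) =====
-- def _insert_missing_closers(text: str) -> str:
--     """
--     Walk the JSON character-by-character and insert missing closing braces/
--     brackets wherever the bracket stack disagrees with the actual token.
--
--     Handles the case where the LLM drops a closing `}` for the last object
--     in an array, e.g.:
--
--         "lessons": [
--           { "id": "l1", "objective": "..."   ← missing }
--         ]                                     ← ] seen while stack top is }
--
--     Compared with _repair_truncated_json (which only appends a suffix for
--     truly truncated responses), this function fixes interior structural gaps.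
--     """
--     result: list[str] = []
--     stack:  list[str] = []  # expected closing tokens
--     i, n = 0, len(text)
--
--     while i < n:
--         ch = text[i]
--
--         # ── string literal — copy verbatim, don't inspect brackets inside ──
--         if ch == '"':
--             result.append(ch)
--             i += 1
--             while i < n:
--                 c = text[i]
--                 if c == '\\':
--                     result.append(c)
--                     i += 1
--                     if i < n:
--                         result.append(text[i])
--                         i += 1
--                     continue
--                 result.append(c)
--                 i += 1
--                 if c == '"':
--                     break
--             continue
--
--         # ── opening brackets ──────────────────────────────────────────────
--         if ch == '{':
--             stack.append('}')
--         elif ch == '[':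
--             stack.append(']')
--
--         # ── closing brackets — insert missing closers if stack mismatches ─
--         elif ch in '}]':
--             while stack and stack[-1] != ch:
--                 result.append(stack.pop())   # e.g. insert '}' before ']'
--             if stack:
--                 stack.pop()
--
--         result.append(ch)
--         i += 1
--
--     # Append any remaining unclosed brackets (handles truncated suffix too)
--     while stack:
--         result.append(stack.pop())
--
--     return ''.join(result)
-- ===== SOURCE B (Python) =====
-- def _insert_missing_closers(text: str) -> str:
--     """Slice-and-splice: locate string literals by jumping with str.find and
--     checking the parity of the backslash run before each quote; record closer
--     insertions only where a mismatched closer occurs; assemble the output from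
--     verbatim slices of the input plus the inserted closers."""
--     n = len(text)
--     pieces = []
--     last = 0          # start of the pending verbatim slice
--     stack = []        # expected closing tokens, top at the end
--     i = 0
--     while i < n:
--         ch = text[i]
--         if ch == '"':
--             i = _string_end(text, i + 1)
--         elif ch == '{':
--             stack.append('}')
--             i += 1
--         elif ch == '[':
--             stack.append(']')
--             i += 1
--         elif ch == '}' or ch == ']':
--             ins = []
--             while stack and stack[-1] != ch:
--                 ins.append(stack.pop())
--             if stack:
--                 stack.pop()
--             if ins:
--                 pieces.append(text[last:i])
--                 pieces.append(''.join(ins))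
--                 last = i
--             i += 1
--         else:
--             i += 1
--     pieces.append(text[last:])
--     stack.reverse()
--     pieces.append(''.join(stack))
--     return ''.join(pieces)
--
--
-- def _string_end(text: str, start: int) -> int:
--     """Index just past the closing quote of the string whose content begins at
--     `start`; a quote preceded by an odd-length backslash run is escaped.
--     Returns len(text) for an unterminated string."""
--     n = len(text)
--     i = start
--     while True:
--         j = text.find('"', i)
--         if j == -1:
--             return n
--         k = j
--         while k > start and text[k - 1] == '\\':
--             k -= 1
--         if (j - k) % 2 == 0:
--             return j + 1
--         i = j + 1
-- ===== Notes on version B (the rewrite author's own statement) =====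
-- stated objective: alternative
-- what changed: Replaced A's fused char-by-char copy loop with slice-and-splice assembly: string literals are skipped by str.find jumps plus a backslash-run parity check, closer insertions are recorded only at mismatch points, and the output is joined from verbatim slices of the input instead of appending every character.
import Mathlib
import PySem

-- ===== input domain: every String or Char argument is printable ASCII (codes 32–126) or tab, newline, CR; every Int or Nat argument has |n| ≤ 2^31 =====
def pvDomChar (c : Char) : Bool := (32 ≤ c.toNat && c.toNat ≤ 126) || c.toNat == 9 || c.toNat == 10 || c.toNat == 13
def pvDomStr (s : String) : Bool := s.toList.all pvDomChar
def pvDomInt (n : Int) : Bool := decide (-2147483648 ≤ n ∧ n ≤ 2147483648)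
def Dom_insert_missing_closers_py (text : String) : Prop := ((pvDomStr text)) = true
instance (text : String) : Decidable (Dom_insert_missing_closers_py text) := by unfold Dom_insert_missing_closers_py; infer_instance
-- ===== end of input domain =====

-- B replaces A's fused char-by-char copy loop by slice-and-splice assembly:
-- string literals are skipped by find-with-backslash-run-parity jumps, closer
-- insertions are recorded only at mismatch points, and the output is joined
-- from verbatim slices of the input; objective: alternative algorithm.

-- ===== PORT A =====
-- stack is represented head-as-top (Python append/pop at the end).
-- `while stack and stack[-1] != ch: result.append(stack.pop())` : returns the
-- popped-and-appended closers and the remaining stack.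
def pvPopMismatch (stack : List Char) (ch : Char) : List Char × List Char :=
  match stack with
  | [] => ([], [])
  | t :: s =>
    if t ≠ ch then
      let p := pvPopMismatch s ch
      (t :: p.1, p.2)
    else ([], t :: s)

-- A's inner string loop: consumes chars of `rest`, appending to `result`,
-- until a closing quote or end of input; returns (remaining input, result).
def pyAStr (rest result : List Char) : List Char × List Char :=
  match rest with
  | [] => (rest, result)
  | c :: rest1 =>
    if c = '\\' then
      match rest1 with
      | [] => ([], result ++ [c])                 -- `if i < n` fails
      | d :: rest2 => pyAStr rest2 (result ++ [c, d])
    else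
      if c = '"' then (rest1, result ++ [c])       -- break after append
      else pyAStr rest1 (result ++ [c])

theorem pyAStr_fst_len_aux : ∀ n rest, rest.length ≤ n → ∀ result,
    (pyAStr rest result).1.length ≤ rest.length := by
  intro n
  induction n with
  | zero =>
    intro rest h result
    have : rest = [] := by cases rest <;> simp_all
    subst this; simp [pyAStr]
  | succ n ih =>
    intro rest h result
    cases rest with
    | nil => simp [pyAStr]
    | cons c rest1 =>
      rw [pyAStr.eq_def]
      by_cases he : c = '\\'
      · subst he
        cases rest1 with
        | nil => simp
        | cons d rest2 =>
          simp only [reduceIte]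
          have := ih rest2 (by simp at h; omega) (result ++ ['\\', d])
          simp; omega
      · simp only [if_neg he]
        by_cases hq : c = '"'
        · simp [hq]
        · simp only [if_neg hq]
          have := ih rest1 (by simp at h; omega) (result ++ [c])
          simp; omega

theorem pyAStr_fst_len (rest result : List Char) :
    (pyAStr rest result).1.length ≤ rest.length :=
  pyAStr_fst_len_aux rest.length rest le_rfl result

-- A's outer while-loop over the index i, as recursion on the remaining input.
def pyAMain (rest stack result : List Char) : List Char :=
  match rest with
  | [] => result ++ stack                          -- final `while stack: ...`
  | ch :: rest1 =>
    if ch = '"' then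
      let p := pyAStr rest1 (result ++ [ch])
      pyAMain p.1 stack p.2
    else if ch = '{' then pyAMain rest1 ('}' :: stack) (result ++ [ch])
    else if ch = '[' then pyAMain rest1 (']' :: stack) (result ++ [ch])
    else if ch = '}' ∨ ch = ']' then
      let p := pvPopMismatch stack ch
      pyAMain rest1 p.2.tail (result ++ p.1 ++ [ch])   -- `if stack: stack.pop()`
    else pyAMain rest1 stack (result ++ [ch])
  termination_by rest.length
  decreasing_by
  · have := pyAStr_fst_len rest1 (result ++ [ch]); simp; omega
  · simp
  · simp
  · simp
  · simp

def insert_missing_closers_py (text : String) : String :=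
  String.ofList (pyAMain text.toList [] [])

-- ===== PORT B =====
-- `text.find('"', i)` (hand port of str.find with a start, exact for 0 ≤ i):
-- first index ≥ i holding '"', none if there is none.
def bFindQuote (cs : List Char) (i : Nat) : Option Nat :=
  if h : i < cs.length then
    if cs.getD i ' ' = '"' then some i else bFindQuote cs (i + 1)
  else none
  termination_by cs.length - i

-- bounds of a found quote, cited by bStringEnd's termination proof
theorem bFindQuote_bounds : ∀ fuel cs i j, cs.length - i ≤ fuel →
    bFindQuote cs i = some j → i ≤ j ∧ j < cs.length := by
  intro fuel
  induction fuel with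
  | zero =>
    intro cs i j h hq
    rw [bFindQuote] at hq
    have : ¬ i < cs.length := by omega
    simp [this] at hq
  | succ n ih =>
    intro cs i j h hq
    rw [bFindQuote] at hq
    by_cases hi : i < cs.length
    · simp only [dif_pos hi] at hq
      by_cases hc : cs.getD i ' ' = '"'
      · rw [if_pos hc] at hq
        have : i = j := by injection hq
        omega
      · rw [if_neg hc] at hq
        have := ih cs (i + 1) j (by omega) hq
        omega
    · simp [hi] at hq

-- `while k > start and text[k-1] == '\\': k -= 1` : start of the backslash
-- run ending just before k (bounded below by start).
def bRunStart (cs : List Char) (start k : Nat) : Nat :=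
  if start < k ∧ cs.getD (k - 1) ' ' = '\\' then bRunStart cs start (k - 1) else k
  termination_by k
  decreasing_by omega

-- `_string_end(text, start)` : scan from i for the next quote; a quote after
-- an odd backslash run is escaped, continue after it.  `fuel` is only a
-- totality guard (i strictly increases and is bounded by the length, so
-- `cs.length + 1` fuel is never exhausted).
def bStringEnd (fuel : Nat) (cs : List Char) (start i : Nat) : Nat :=
  match fuel with
  | 0 => cs.length
  | fuel + 1 =>
    match bFindQuote cs i with
    | none => cs.length
    | some j =>
      if (j - bRunStart cs start j) % 2 == 0 then j + 1
      else bStringEnd fuel cs start (j + 1)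

-- B's flush: `while stack and stack[-1] != ch: ins.append(stack.pop())` then
-- `if stack: stack.pop()` — returns (ins, stack after both).
def bPop (stack : List Char) (ch : Char) : List Char × List Char :=
  match stack with
  | [] => ([], [])
  | t :: s =>
    if t ≠ ch then
      let p := bPop s ch
      (t :: p.1, p.2)
    else ([], s)

-- `text[last:i]` (exact for 0 ≤ last ≤ i) and `text[last:]`
def bSlice (cs : List Char) (a b : Nat) : List Char := (cs.drop a).take (b - a)
def bSliceEnd (cs : List Char) (a : Nat) : List Char := cs.drop a

-- cited by bMain's termination proof
theorem bStringEnd_ge : ∀ fuel cs start i, i ≤ cs.length →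
    i ≤ bStringEnd fuel cs start i ∧ bStringEnd fuel cs start i ≤ cs.length := by
  intro fuel
  induction fuel with
  | zero => intro cs start i hi; simp [bStringEnd]; omega
  | succ n ih =>
    intro cs start i hi
    rw [bStringEnd]
    match hq : bFindQuote cs i with
    | none => simp; omega
    | some j =>
      have hb := bFindQuote_bounds (cs.length - i) cs i j le_rfl hq
      simp only
      split
      · omega
      · have := ih cs start (j + 1) (by omega)
        omega

-- B's main loop over the index i.
def bMain (cs : List Char) (i last : Nat) (stack : List Char)
    (pieces : List (List Char)) : List (List Char) :=
  if hlt : i < cs.length then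
    let ch := cs.getD i ' '
    if ch = '"' then bMain cs (bStringEnd (cs.length + 1) cs (i + 1) (i + 1)) last stack pieces
    else if ch = '{' then bMain cs (i + 1) last ('}' :: stack) pieces
    else if ch = '[' then bMain cs (i + 1) last (']' :: stack) pieces
    else if ch = '}' ∨ ch = ']' then
      let p := bPop stack ch
      if p.1 = [] then bMain cs (i + 1) last p.2 pieces
      else bMain cs (i + 1) i p.2 (pieces ++ [bSlice cs last i, p.1])
    else bMain cs (i + 1) last stack pieces
  else
    -- text[last:], then `stack.reverse(); ''.join(stack)` (head-as-top list
    -- is already in pop order)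
    pieces ++ [bSliceEnd cs last, stack]
  termination_by cs.length - i
  decreasing_by
  · have := bStringEnd_ge (cs.length + 1) cs (i + 1) (i + 1) (by omega)
    omega
  all_goals omega

def insert_missing_closers_py_alt (text : String) : String :=
  String.ofList (bMain text.toList 0 0 [] []).flatten

-- ===== PRECONDITION & SPEC =====
def Spec_insert_missing_closers_py (text : String) (out : String) : Prop := out = insert_missing_closers_py_alt text
instance (text : String) (out : String) : Decidable (Spec_insert_missing_closers_py text out) := by unfold Spec_insert_missing_closers_py; infer_instance

-- ===== CLAIM (what is proved, stated in full; the proofs are below) =====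
def Claim_equal_insert_missing_closers_py : Prop := ∀ (text : String), Dom_insert_missing_closers_py text → Spec_insert_missing_closers_py text (insert_missing_closers_py text)

-- ===== LEMMAS AND PROOFS =====

-- ---- A's string scanner copies verbatim: characterisation by a length ----

-- number of characters A's inner string loop consumes
def aSkip : List Char → Nat
  | [] => 0
  | c :: r1 =>
    if c = '\\' then
      match r1 with
      | [] => 1
      | _ :: r2 => 2 + aSkip r2
    else if c = '"' then 1
    else 1 + aSkip r1

theorem aSkip_nil : aSkip [] = 0 := by rw [aSkip.eq_def]
theorem aSkip_bs1 : aSkip ['\\'] = 1 := by rw [aSkip.eq_def]; simp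
theorem aSkip_bs (c : Char) (r : List Char) : aSkip ('\\' :: c :: r) = 2 + aSkip r := by
  rw [aSkip.eq_def]; simp
theorem aSkip_quote (r : List Char) : aSkip ('"' :: r) = 1 := by
  rw [aSkip.eq_def]; simp
theorem aSkip_other (c : Char) (r : List Char) (hc : c ≠ '\\') (hq : c ≠ '"') :
    aSkip (c :: r) = 1 + aSkip r := by
  rw [aSkip.eq_def]; simp [hc, hq]

theorem aSkip_le : ∀ r, aSkip r ≤ r.length := by
  intro r
  induction r using aSkip.induct with
  | case1 => simp [aSkip_nil]
  | case2 => simp [aSkip_bs1]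
  | case3 c r2 ih => rw [aSkip_bs]; simp; omega
  | case4 r2 h => rw [aSkip_quote]; simp
  | case5 c r2 hc hq ih => rw [aSkip_other c r2 hc hq]; simp; omega

theorem pyAStr_eq : ∀ r acc,
    pyAStr r acc = (r.drop (aSkip r), acc ++ r.take (aSkip r)) := by
  intro r
  induction r using aSkip.induct with
  | case1 => intro acc; rw [pyAStr.eq_def]; simp [aSkip_nil]
  | case2 => intro acc; rw [pyAStr.eq_def]; simp [aSkip_bs1]
  | case3 c r2 ih =>
    intro acc
    rw [pyAStr.eq_def]
    simp only [reduceIte, ih]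
    rw [aSkip_bs]
    have h2 : 2 + aSkip r2 = aSkip r2 + 2 := by omega
    rw [h2]
    simp
  | case4 r2 h =>
    intro acc
    rw [pyAStr.eq_def]
    rw [aSkip_quote]
    simp
  | case5 c r2 hc hq ih =>
    intro acc
    rw [pyAStr.eq_def]
    dsimp only
    rw [if_neg hc, if_neg hq, ih, aSkip_other c r2 hc hq]
    have h2 : 1 + aSkip r2 = aSkip r2 + 1 := by omega
    rw [h2]
    simp

-- ---- forward string-state scanner (parity of the pending backslash run) ----

def gSkip : List Char → Bool → Nat
  | [], _ => 0
  | c :: r1, p =>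
    if c = '"' then (if p then 1 + gSkip r1 false else 1)
    else if c = '\\' then 1 + gSkip r1 (!p)
    else 1 + gSkip r1 false

theorem gSkip_nil (p : Bool) : gSkip [] p = 0 := by rw [gSkip.eq_def]
theorem gSkip_quote (r : List Char) (p : Bool) :
    gSkip ('"' :: r) p = if p then 1 + gSkip r false else 1 := by
  rw [gSkip.eq_def]; simp
theorem gSkip_bs (r : List Char) (p : Bool) : gSkip ('\\' :: r) p = 1 + gSkip r (!p) := by
  rw [gSkip.eq_def]; simp
theorem gSkip_other (c : Char) (r : List Char) (p : Bool) (hc : c ≠ '\\') (hq : c ≠ '"') :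
    gSkip (c :: r) p = 1 + gSkip r false := by
  rw [gSkip.eq_def]; simp [hc, hq]

theorem gSkip_cons_true : ∀ d r, gSkip (d :: r) true = 1 + gSkip r false := by
  intro d r
  by_cases h1 : d = '"'
  · subst h1; rw [gSkip_quote]; simp
  · by_cases h2 : d = '\\'
    · subst h2; rw [gSkip_bs]; simp
    · rw [gSkip_other d r true h2 h1]

theorem aSkip_eq_gSkip : ∀ r, aSkip r = gSkip r false := by
  intro r
  induction r using aSkip.induct with
  | case1 => rw [aSkip_nil, gSkip_nil]
  | case2 => rw [aSkip_bs1, gSkip_bs, gSkip_nil]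
  | case3 c r2 ih =>
    rw [aSkip_bs, ih, gSkip_bs]
    simp only [Bool.not_false]
    rw [gSkip_cons_true]
    omega
  | case4 r2 h => rw [aSkip_quote, gSkip_quote]; simp
  | case5 c r2 hc hq ih =>
    rw [aSkip_other c r2 hc hq, gSkip_other c r2 false hc hq, ih]

-- ---- bRunStart step lemmas ----

theorem bRunStart_le : ∀ cs start k, bRunStart cs start k ≤ k := by
  intro cs start k
  induction k using Nat.strong_induction_on with
  | _ k ih =>
    rw [bRunStart]
    split
    · rename_i h
      have := ih (k - 1) (by omega)
      omega
    · omega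

theorem bRunStart_self (cs : List Char) (start : Nat) :
    bRunStart cs start start = start := by
  rw [bRunStart]; simp

theorem bRunStart_bs (cs : List Char) (start i : Nat) (h : start ≤ i)
    (hc : cs.getD i ' ' = '\\') :
    bRunStart cs start (i + 1) = bRunStart cs start i := by
  rw [bRunStart]
  have : start < i + 1 ∧ cs.getD (i + 1 - 1) ' ' = '\\' := by
    constructor
    · omega
    · simpa using hc
  rw [if_pos this]
  simp

theorem bRunStart_other (cs : List Char) (start i : Nat)
    (hc : cs.getD i ' ' ≠ '\\') :
    bRunStart cs start (i + 1) = i + 1 := by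
  rw [bRunStart]
  rw [if_neg]
  intro h
  exact hc (by simpa using h.2)

theorem parity_succ (x : Nat) : ((x + 1) % 2 == 1) = !(x % 2 == 1) := by
  rcases Nat.mod_two_eq_zero_or_one x with h | h <;>
    simp [Nat.add_mod, h]

theorem beq_zero_not_one (x : Nat) : ((x % 2 == 0) = true) ↔ ((x % 2 == 1) = false) := by
  rcases Nat.mod_two_eq_zero_or_one x with h | h <;> simp [h]

-- ---- bFindQuote: none past the end, step on a non-quote ----

theorem bFindQuote_none (cs : List Char) (i : Nat) (h : cs.length ≤ i) :
    bFindQuote cs i = none := by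
  rw [bFindQuote]
  have : ¬ i < cs.length := by omega
  simp [this]

theorem bFindQuote_step (cs : List Char) (i : Nat) (hi : i < cs.length)
    (hc : cs.getD i ' ' ≠ '"') : bFindQuote cs i = bFindQuote cs (i + 1) := by
  rw [bFindQuote]
  rw [dif_pos hi, if_neg hc]

theorem bFindQuote_quote (cs : List Char) (i : Nat) (hi : i < cs.length)
    (hc : cs.getD i ' ' = '"') : bFindQuote cs i = some i := by
  rw [bFindQuote]
  rw [dif_pos hi, if_pos hc]

-- ---- bStringEnd computes i + gSkip of the suffix ----

theorem bStringEnd_skip (cs : List Char) (start : Nat) :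
    ∀ n fuel i, cs.length - i ≤ n → cs.length - i < fuel → start ≤ i →
      i ≤ cs.length →
      bStringEnd fuel cs start i
        = i + gSkip (cs.drop i) ((i - bRunStart cs start i) % 2 == 1) := by
  intro n
  induction n with
  | zero =>
    intro fuel i hn hf hs hi
    have hie : i = cs.length := by omega
    match fuel, hf with
    | fuel + 1, _ =>
      rw [bStringEnd]
      rw [bFindQuote_none cs i (by omega)]
      simp [hie, gSkip]
  | succ n ih =>
    intro fuel i hn hf hs hi
    by_cases hie : i = cs.length
    · match fuel, hf with
      | fuel + 1, _ =>
        rw [bStringEnd]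
        rw [bFindQuote_none cs i (by omega)]
        simp [hie, gSkip]
    · have hlt : i < cs.length := by omega
      have hdrop : cs.drop i = cs.getD i ' ' :: cs.drop (i + 1) := by
        rw [List.getD_eq_getElem cs ' ' hlt]
        exact List.drop_eq_getElem_cons hlt
      match fuel, hf with
      | fuel + 1, _ =>
        by_cases hq : cs.getD i ' ' = '"'
        · rw [bStringEnd]
          rw [bFindQuote_quote cs i hlt hq]
          simp only
          rw [hdrop, hq]
          by_cases hp : (i - bRunStart cs start i) % 2 = 0
          · have h1 : ((i - bRunStart cs start i) % 2 == 0) = true := by simp [hp]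
            have h2 : ((i - bRunStart cs start i) % 2 == 1) = false := by
              exact (beq_zero_not_one _).mp h1
            rw [if_pos h1, h2]
            simp [gSkip]
          · have hp1 : (i - bRunStart cs start i) % 2 = 1 := by omega
            have h1 : ((i - bRunStart cs start i) % 2 == 0) = false := by simp [hp]
            have h2 : ((i - bRunStart cs start i) % 2 == 1) = true := by simp [hp1]
            rw [if_neg (by simp [h1]), h2]
            have hrec := ih fuel (i + 1) (by omega) (by omega) (by omega) (by omega)
            rw [hrec]
            have hr : bRunStart cs start (i + 1) = i + 1 :=
              bRunStart_other cs start i (by rw [hq]; decide)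
            rw [hr]
            simp [gSkip]
            omega
        · rw [bStringEnd]
          rw [bFindQuote_step cs i hlt hq]
          have hrec : bStringEnd (fuel + 1) cs start (i + 1)
              = (i + 1) + gSkip (cs.drop (i + 1))
                  (((i + 1) - bRunStart cs start (i + 1)) % 2 == 1) := by
            by_cases hfe : cs.length - (i + 1) < fuel + 1
            · exact ih (fuel + 1) (i + 1) (by omega) hfe (by omega) (by omega)
            · omega
          rw [bStringEnd] at hrec
          rw [hrec, hdrop]
          by_cases hb : cs.getD i ' ' = '\\'
          · rw [hb]
            have hk := bRunStart_bs cs start i hs hb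
            have hk2 := bRunStart_le cs start i
            have : (i + 1) - bRunStart cs start (i + 1)
                = (i - bRunStart cs start i) + 1 := by rw [hk]; omega
            rw [this, parity_succ]
            rw [gSkip_bs]
            omega
          · have hk := bRunStart_other cs start i hb
            rw [hk]
            simp only [Nat.sub_self]
            have : ((0 : Nat) % 2 == 1) = false := by decide
            rw [this]
            rw [gSkip_other _ _ _ hb hq]
            omega

-- what bMain's quote branch jumps by: A's aSkip of the suffix
theorem bStringEnd_call (cs : List Char) (i : Nat) (hi : i < cs.length) :
    bStringEnd (cs.length + 1) cs (i + 1) (i + 1)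
      = (i + 1) + aSkip (cs.drop (i + 1)) := by
  have h := bStringEnd_skip cs (i + 1) (cs.length - (i + 1)) (cs.length + 1)
    (i + 1) le_rfl (by omega) le_rfl (by omega)
  rw [h, bRunStart_self]
  simp only [Nat.sub_self]
  have : ((0 : Nat) % 2 == 1) = false := by decide
  rw [this, aSkip_eq_gSkip]

-- ---- slices ----

theorem bSlice_append (cs : List Char) (a b m : Nat) (hab : a ≤ b) :
    bSlice cs a b ++ (cs.drop b).take m = bSlice cs a (b + m) := by
  unfold bSlice
  have h1 : b + m - a = (b - a) + m := by omega
  rw [h1, List.take_add]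
  have h2 : (cs.drop a).drop (b - a) = cs.drop b := by
    rw [List.drop_drop]
    have h3 : a + (b - a) = b := by omega
    rw [h3]
  rw [h2]

theorem bSlice_snoc (cs : List Char) (a b : Nat) (hab : a ≤ b)
    (hb : b < cs.length) :
    bSlice cs a b ++ [cs.getD b ' '] = bSlice cs a (b + 1) := by
  have h := bSlice_append cs a b 1 hab
  rw [← h]
  congr 1
  rw [List.getD_eq_getElem cs ' ' hb]
  rw [List.drop_eq_getElem_cons hb]
  rfl


theorem bSlice_end (cs : List Char) (a : Nat) :
    bSlice cs a cs.length = cs.drop a := by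
  unfold bSlice
  apply List.take_of_length_le
  simp

-- ---- B's flush agrees with A's ----

theorem bPop_eq (stack : List Char) (ch : Char) :
    bPop stack ch = ((pvPopMismatch stack ch).1, (pvPopMismatch stack ch).2.tail) := by
  induction stack with
  | nil => simp [bPop, pvPopMismatch]
  | cons t s ih =>
    by_cases h : t = ch
    · simp [bPop, pvPopMismatch, h]
    · simp [bPop, pvPopMismatch, h, ih]

-- ---- main loop invariant ----

theorem main_eq (cs : List Char) :
    ∀ n i, cs.length - i ≤ n → ∀ last stack pieces, last ≤ i → i ≤ cs.length →
      pyAMain (cs.drop i) stack (pieces.flatten ++ bSlice cs last i)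
        = (bMain cs i last stack pieces).flatten := by
  intro n
  induction n with
  | zero =>
    intro i hn last stack pieces hlast hi
    have hie : i = cs.length := by omega
    rw [bMain]
    have : ¬ i < cs.length := by omega
    rw [dif_neg this]
    subst hie
    simp [pyAMain, bSlice_end, bSliceEnd]
  | succ n ih =>
    intro i hn last stack pieces hlast hi
    by_cases hlt : i < cs.length
    · have hdrop : cs.drop i = cs.getD i ' ' :: cs.drop (i + 1) := by
        rw [List.getD_eq_getElem cs ' ' hlt]
        exact List.drop_eq_getElem_cons hlt
      rw [bMain, dif_pos hlt, hdrop]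
      set ch := cs.getD i ' ' with hch
      have hsnoc : pieces.flatten ++ bSlice cs last i ++ [ch]
          = pieces.flatten ++ bSlice cs last (i + 1) := by
        rw [List.append_assoc, hch, bSlice_snoc cs last i hlast hlt]
      by_cases h1 : ch = '"'
      · rw [pyAMain, if_pos h1]
        simp only
        rw [pyAStr_eq]
        have hm_le : aSkip (cs.drop (i + 1)) ≤ cs.length - (i + 1) := by
          have := aSkip_le (cs.drop (i + 1))
          simpa using this
        have harg : (cs.drop (i + 1)).drop (aSkip (cs.drop (i + 1)))
            = cs.drop (i + 1 + aSkip (cs.drop (i + 1))) := by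
          rw [List.drop_drop]
        have hstep : pieces.flatten ++ bSlice cs last i ++ [ch]
            ++ (cs.drop (i + 1)).take (aSkip (cs.drop (i + 1)))
            = pieces.flatten ++ bSlice cs last (i + 1 + aSkip (cs.drop (i + 1))) := by
          rw [hsnoc, List.append_assoc,
            bSlice_append cs last (i + 1) (aSkip (cs.drop (i + 1))) (by omega)]
        rw [harg, hstep]
        rw [if_pos h1, bStringEnd_call cs i hlt]
        exact ih (i + 1 + aSkip (cs.drop (i + 1))) (by omega) last stack pieces
          (by omega) (by omega)
      · rw [if_neg h1]
        by_cases h2 : ch = '{'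
        · rw [pyAMain, if_neg h1, if_pos h2, if_pos h2]
          rw [hsnoc]
          exact ih (i + 1) (by omega) last ('}' :: stack) pieces (by omega) (by omega)
        · rw [if_neg h2]
          by_cases h3 : ch = '['
          · rw [pyAMain, if_neg h1, if_neg h2, if_pos h3, if_pos h3]
            rw [hsnoc]
            exact ih (i + 1) (by omega) last (']' :: stack) pieces (by omega) (by omega)
          · rw [if_neg h3]
            by_cases h4 : ch = '}' ∨ ch = ']'
            · rw [pyAMain, if_neg h1, if_neg h2, if_neg h3, if_pos h4, if_pos h4]
              simp only
              rw [bPop_eq]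
              by_cases h5 : (pvPopMismatch stack ch).1 = []
              · rw [if_pos (by simp [h5])]
                rw [h5, List.append_nil, hsnoc]
                exact ih (i + 1) (by omega) last (pvPopMismatch stack ch).2.tail
                  pieces (by omega) (by omega)
              · rw [if_neg (by simp [h5])]
                rw [← ih (i + 1) (by omega) i (pvPopMismatch stack ch).2.tail
                  (pieces ++ [bSlice cs last i, (pvPopMismatch stack ch).1])
                  (by omega) (by omega)]
                have hseg : bSlice cs i (i + 1) = [ch] := by
                  unfold bSlice
                  rw [hdrop]
                  simp
                rw [hseg]
                simp
            · rw [pyAMain, if_neg h1, if_neg h2, if_neg h3, if_neg h4, if_neg h4]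
              rw [hsnoc]
              exact ih (i + 1) (by omega) last stack pieces (by omega) (by omega)
    · rw [bMain, dif_neg hlt]
      have hie : i = cs.length := by omega
      subst hie
      simp [pyAMain, bSlice_end, bSliceEnd]


-- ===== VERDICT (by name: the statement is the Claim_ definition above) =====
theorem insert_missing_closers_py_spec : Claim_equal_insert_missing_closers_py := by
  intro text _
  unfold Spec_insert_missing_closers_py insert_missing_closers_py insert_missing_closers_py_alt
  have h := main_eq text.toList text.toList.length 0 (by omega) 0 [] [] le_rfl (by omega)
  simp only [List.drop_zero, List.flatten_nil, List.nil_append] at h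
  rw [← h]
  have hz : bSlice text.toList 0 0 = [] := by simp [bSlice]
  rw [hz]
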